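-- pv_equiv track=rewrite | github.com/abhichhn93/bhoolamind | modules/emotion_tagger.py | _analyze_mood_pattern
-- ===== SOURCE A (Python) =====
-- from typing import Dict, List, Optional
--
-- def _analyze_mood_pattern(recent_moods: List[str]) -> str:
--     """Analyze patterns in recent moods"""
--     if len(recent_moods) < 3:
--         return "insufficient_data"
--
--     # Check for consistency
--     if len(set(recent_moods)) == 1:
--         return "stable"
--
--     # Check for escalation
--     mood_values = {"sad": 1, "anxious": 2, "neutral": 3, "happy": 4, "excited": 5}
--     values = [mood_values.get(mood, 3) for mood in recent_moods]
--
--     if all(values[i] <= values[i+1] for i in range(len(values)-1)):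
--         return "improving"
--     elif all(values[i] >= values[i+1] for i in range(len(values)-1)):
--         return "declining"
--     else:
--         return "fluctuating"
-- ===== SOURCE B (Python) =====
-- def _analyze_mood_pattern(recent_moods):
--     if len(recent_moods) < 3:
--         return "insufficient_data"
--     if len(set(recent_moods)) == 1:
--         return "stable"
--     mood_values = {"sad": 1, "anxious": 2, "neutral": 3, "happy": 4, "excited": 5}
--     values = [mood_values.get(mood, 3) for mood in recent_moods]
--     if values == sorted(values):
--         return "improving"
--     if values == sorted(values, reverse=True):
--         return "declining"
--     return "fluctuating"
-- ===== Notes on version B (the rewrite author's own statement) =====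
-- stated objective: idiomatic
-- what changed: The two pairwise index-scan all(...) monotonicity checks are replaced by comparing the values list against sorted(values) and sorted(values, reverse=True).
import Mathlib
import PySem

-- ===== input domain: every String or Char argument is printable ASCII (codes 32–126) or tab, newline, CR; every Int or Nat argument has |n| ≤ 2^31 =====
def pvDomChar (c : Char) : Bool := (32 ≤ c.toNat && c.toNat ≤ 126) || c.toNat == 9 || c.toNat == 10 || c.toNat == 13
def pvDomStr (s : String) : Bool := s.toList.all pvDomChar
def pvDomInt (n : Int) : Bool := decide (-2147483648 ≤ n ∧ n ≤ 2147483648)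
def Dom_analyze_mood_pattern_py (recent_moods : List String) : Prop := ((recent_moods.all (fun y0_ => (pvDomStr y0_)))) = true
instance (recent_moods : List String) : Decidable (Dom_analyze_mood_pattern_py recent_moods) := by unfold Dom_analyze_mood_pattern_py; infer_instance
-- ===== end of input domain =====

-- B replaces A's two pairwise index-scan all(...) monotonicity checks by comparing the
-- values list with sorted(values) and sorted(values, reverse=True) (more idiomatic).

-- ===== PORT A =====
-- the literal dict {"sad": 1, "anxious": 2, "neutral": 3, "happy": 4, "excited": 5}
def pvMoodValues : PySem.Dict String Int :=
  PySem.Dict.ofList [("sad", 1), ("anxious", 2), ("neutral", 3), ("happy", 4), ("excited", 5)]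

def analyze_mood_pattern_py (recent_moods : List String) : String :=
  if PySem.List.len recent_moods < 3 then "insufficient_data"
  else if PySem.Set.len (PySem.Set.ofList recent_moods) = 1 then "stable"
  else
    let values := recent_moods.map (fun mood => PySem.Dict.getD pvMoodValues mood 3)
    if (PySem.List.pyRange 0 (PySem.List.len values - 1) 1).all
         (fun i => decide (PySem.List.pyGetD values i 0 ≤ PySem.List.pyGetD values (i + 1) 0)) then
      "improving"
    else if (PySem.List.pyRange 0 (PySem.List.len values - 1) 1).all
         (fun i => decide (PySem.List.pyGetD values i 0 ≥ PySem.List.pyGetD values (i + 1) 0)) then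
      "declining"
    else "fluctuating"

-- ===== PORT B =====
def analyze_mood_pattern_py_alt (recent_moods : List String) : String :=
  if PySem.List.len recent_moods < 3 then "insufficient_data"
  else if PySem.Set.len (PySem.Set.ofList recent_moods) = 1 then "stable"
  else
    let values := recent_moods.map (fun mood => PySem.Dict.getD pvMoodValues mood 3)
    if values = PySem.List.sorted values (fun x => x) false then "improving"
    else if values = PySem.List.sorted values (fun x => x) true then "declining"
    else "fluctuating"

-- ===== PRECONDITION & SPEC =====
def Spec_analyze_mood_pattern_py (recent_moods : List String) (out : String) : Prop := out = analyze_mood_pattern_py_alt recent_moods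
instance (recent_moods : List String) (out : String) : Decidable (Spec_analyze_mood_pattern_py recent_moods out) := by unfold Spec_analyze_mood_pattern_py; infer_instance

-- ===== CLAIM (what is proved, stated in full; the proofs are below) =====
def Claim_equal_analyze_mood_pattern_py : Prop := ∀ (recent_moods : List String), Dom_analyze_mood_pattern_py recent_moods → Spec_analyze_mood_pattern_py recent_moods (analyze_mood_pattern_py recent_moods)

-- ===== LEMMAS AND PROOFS =====

-- A's index scan over range(len-1) is exactly adjacent-pairwise comparison
theorem pvScan_iff_chain' (R : Int → Int → Prop) [inst : ∀ a b : Int, Decidable (R a b)]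
    (values : List Int) :
    ((PySem.List.pyRange 0 (PySem.List.len values - 1) 1).all
       (fun i => decide (R (PySem.List.pyGetD values i 0) (PySem.List.pyGetD values (i + 1) 0))) = true)
    ↔ List.IsChain R values := by
  rw [List.isChain_iff_getElem]
  simp only [List.all_eq_true, PySem.List.mem_pyRange_one, PySem.List.len_eq, decide_eq_true_eq]
  constructor
  · intro h i hi
    have := h i ⟨by exact_mod_cast Int.natCast_nonneg i, by omega⟩
    rw [PySem.List.pyGetD_eq_getElem values 0 (by exact_mod_cast Int.natCast_nonneg i) (by omega),
        PySem.List.pyGetD_eq_getElem values 0 (by positivity) (by omega)] at this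
    have e1 : ((i : Int)).toNat = i := by omega
    have e2 : ((i : Int) + 1).toNat = i + 1 := by omega
    simpa [e1, e2] using this
  · intro h i hi
    obtain ⟨h0, h1⟩ := hi
    rw [PySem.List.pyGetD_eq_getElem values 0 h0 (by omega),
        PySem.List.pyGetD_eq_getElem values 0 (by omega) (by omega)]
    have h' := h i.toNat (by omega)
    simpa [show (i + 1).toNat = i.toNat + 1 by omega] using h'

-- B's "values == sorted(values)" is exactly nondecreasing-pairwise
theorem pvSortedEq_iff_pairwise (values : List Int) :
    values = PySem.List.sorted values (fun x => x) false ↔ values.Pairwise (· ≤ ·) := by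
  constructor
  · intro h
    have := PySem.List.sorted_pairwise (xs := values) (key := fun x => x)
    rw [← h] at this
    simpa using this
  · intro h
    exact (PySem.List.sorted_eq_self_of_pairwise values (fun x => x) (by simpa using h)).symm

-- B's "values == sorted(values, reverse=True)" is exactly nonincreasing-pairwise
theorem pvSortedRevEq_iff_pairwise (values : List Int) :
    values = PySem.List.sorted values (fun x => x) true ↔ values.Pairwise (fun a b => b ≤ a) := by
  constructor
  · intro h
    have := PySem.List.sorted_pairwise_rev (xs := values) (key := fun x => x)
    rw [← h] at this
    simpa using this
  · intro h
    exact (PySem.List.sorted_rev_eq_self_of_pairwise values (fun x => x) (by simpa using h)).symm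

theorem pvScanLe_iff (values : List Int) :
    ((PySem.List.pyRange 0 (PySem.List.len values - 1) 1).all
       (fun i => decide (PySem.List.pyGetD values i 0 ≤ PySem.List.pyGetD values (i + 1) 0)) = true)
    ↔ values = PySem.List.sorted values (fun x => x) false := by
  rw [pvScan_iff_chain' (· ≤ ·) values, List.isChain_iff_pairwise, ← pvSortedEq_iff_pairwise]

theorem pvScanGe_iff (values : List Int) :
    ((PySem.List.pyRange 0 (PySem.List.len values - 1) 1).all
       (fun i => decide (PySem.List.pyGetD values i 0 ≥ PySem.List.pyGetD values (i + 1) 0)) = true)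
    ↔ values = PySem.List.sorted values (fun x => x) true := by
  rw [pvScan_iff_chain' (· ≥ ·) values, List.isChain_iff_pairwise]
  exact (pvSortedRevEq_iff_pairwise values).symm

-- ===== VERDICT (by name: the statement is the Claim_ definition above) =====
theorem analyze_mood_pattern_py_spec : Claim_equal_analyze_mood_pattern_py := by
  intro recent_moods _
  unfold Spec_analyze_mood_pattern_py analyze_mood_pattern_py analyze_mood_pattern_py_alt
  by_cases h1 : PySem.List.len recent_moods < 3
  · rw [if_pos h1, if_pos h1]
  rw [if_neg h1, if_neg h1]
  by_cases h2 : PySem.Set.len (PySem.Set.ofList recent_moods) = 1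
  · rw [if_pos h2, if_pos h2]
  rw [if_neg h2, if_neg h2]
  set values := recent_moods.map (fun mood => PySem.Dict.getD pvMoodValues mood 3) with hv
  by_cases h3 : values = PySem.List.sorted values (fun x => x) false
  · rw [if_pos ((pvScanLe_iff values).mpr h3), if_pos h3]
  rw [if_neg (fun hc => h3 ((pvScanLe_iff values).mp hc)), if_neg h3]
  by_cases h4 : values = PySem.List.sorted values (fun x => x) true
  · rw [if_pos ((pvScanGe_iff values).mpr h4), if_pos h4]
  rw [if_neg (fun hc => h4 ((pvScanGe_iff values).mp hc)), if_neg h4]
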